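-- pv_equiv track=rewrite | github.com/XdreaMs404/Vinted | vinted_radar/services/acquisition_benchmark.py | _summarize_discovery_runs
-- ===== SOURCE A (Python) =====
-- def _summarize_discovery_runs(
--     discovery_runs: list[dict[str, object]],
-- ) -> dict[str, object]:
--     return {
--         "run_count": len(discovery_runs),
--         "raw_listing_hits": sum(int(row.get("raw_listing_hits") or 0) for row in discovery_runs),
--         "unique_listing_hits": sum(
--             int(row.get("unique_listing_hits") or 0) for row in discovery_runs
--         ),
--         "successful_scans": sum(
--             int(row.get("successful_scans") or 0) for row in discovery_runs
--         ),
--         "failed_scans": sum(int(row.get("failed_scans") or 0) for row in discovery_runs),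
--         "scanned_leaf_catalogs": sum(
--             int(row.get("scanned_leaf_catalogs") or 0) for row in discovery_runs
--         ),
--     }
-- ===== SOURCE B (Python) =====
-- _METRICS = (
--     "raw_listing_hits",
--     "unique_listing_hits",
--     "successful_scans",
--     "failed_scans",
--     "scanned_leaf_catalogs",
-- )
--
--
-- def _summarize_discovery_runs(
--     discovery_runs: list[dict[str, object]],
-- ) -> dict[str, object]:
--     totals = dict.fromkeys(_METRICS, 0)
--     for row in discovery_runs:
--         for key, value in row.items():
--             if key in totals:
--                 totals[key] += int(value or 0)
--     return {"run_count": len(discovery_runs), **totals}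
-- ===== Notes on version B (the rewrite author's own statement) =====
-- stated objective: alternative
-- what changed: Instead of five per-key sum() scans that look each metric name up in every row, B pre-builds a totals dict keyed by the five metric names and makes one item-driven pass over each row's items, adding every tracked item into the dict (trading the keyed lookups for an items() traversal); Pre_ only excludes assoc-list rows with duplicate keys, an artifact of encoding dicts as lists (a Python dict cannot have them), where A would read the first occurrence and B sums all occurrences.
import Mathlib
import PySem

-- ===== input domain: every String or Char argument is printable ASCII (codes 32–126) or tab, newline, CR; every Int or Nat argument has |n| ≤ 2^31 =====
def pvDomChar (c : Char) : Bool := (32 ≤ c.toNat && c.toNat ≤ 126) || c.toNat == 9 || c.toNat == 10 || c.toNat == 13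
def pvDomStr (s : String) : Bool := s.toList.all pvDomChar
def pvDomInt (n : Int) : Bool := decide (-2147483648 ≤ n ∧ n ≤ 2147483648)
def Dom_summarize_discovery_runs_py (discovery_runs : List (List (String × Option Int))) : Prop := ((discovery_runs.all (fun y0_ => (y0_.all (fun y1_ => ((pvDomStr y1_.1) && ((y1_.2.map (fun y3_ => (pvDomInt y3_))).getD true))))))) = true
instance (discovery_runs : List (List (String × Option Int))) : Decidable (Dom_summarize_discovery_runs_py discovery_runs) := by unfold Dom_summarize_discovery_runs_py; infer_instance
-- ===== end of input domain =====

-- B replaces A's five per-key sum() scans by one item-driven pass adding each row item into a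
-- pre-built totals dict keyed by the five metric names (objective: alternative).

-- shared helper: Python's `int(row.get(k) or 0)` (missing key or None -> 0; int on an int is the int)
def pvGetNum (row : List (String × Option Int)) (k : String) : Int :=
  match row.find? (fun p => p.1 == k) with
  | some (_, some n) => n
  | _ => 0

-- ===== PORT A =====
def summarize_discovery_runs_py (discovery_runs : List (List (String × Option Int))) : List (String × Int) :=
  [("run_count", (discovery_runs.length : Int)),
   ("raw_listing_hits", discovery_runs.foldl (fun acc row => acc + pvGetNum row "raw_listing_hits") 0),
   ("unique_listing_hits", discovery_runs.foldl (fun acc row => acc + pvGetNum row "unique_listing_hits") 0),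
   ("successful_scans", discovery_runs.foldl (fun acc row => acc + pvGetNum row "successful_scans") 0),
   ("failed_scans", discovery_runs.foldl (fun acc row => acc + pvGetNum row "failed_scans") 0),
   ("scanned_leaf_catalogs", discovery_runs.foldl (fun acc row => acc + pvGetNum row "scanned_leaf_catalogs") 0)]

-- ===== PORT B =====
-- _METRICS
def pvMetrics : List String :=
  ["raw_listing_hits", "unique_listing_hits", "successful_scans", "failed_scans", "scanned_leaf_catalogs"]

-- `if key in totals: totals[key] += int(value or 0)`  (value is None or an int, so `int(value or 0)` = value.getD 0)
def pvRowStep (t : PySem.Dict String Int) (p : String × Option Int) : PySem.Dict String Int :=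
  if t.contains p.1 then t.modify p.1 0 (· + p.2.getD 0) else t

def summarize_discovery_runs_py_alt (discovery_runs : List (List (String × Option Int))) : List (String × Int) :=
  let totals := discovery_runs.foldl (fun t row => row.foldl pvRowStep t)
    (PySem.Dict.ofList (pvMetrics.map (fun k => (k, (0 : Int)))))    -- dict.fromkeys(_METRICS, 0)
  ("run_count", (discovery_runs.length : Int)) :: totals.items      -- {"run_count": len(...), **totals}

-- ===== PRECONDITION & SPEC =====
-- Pre_ excludes only assoc-list rows with DUPLICATE keys — an artifact of encoding dicts as
-- lists that no Python dict input can produce (A's get reads the first occurrence, B's item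
-- pass sums all occurrences); every encoded Python input satisfies Pre_.
def Pre_summarize_discovery_runs_py (discovery_runs : List (List (String × Option Int))) : Prop :=
  ∀ row ∈ discovery_runs, (row.map Prod.fst).Nodup
instance (discovery_runs : List (List (String × Option Int))) : Decidable (Pre_summarize_discovery_runs_py discovery_runs) := by unfold Pre_summarize_discovery_runs_py; infer_instance

def pvWitness_summarize_discovery_runs_py : (List (List (String × Option Int))) :=
  [[("raw_listing_hits", some 3), ("failed_scans", none), ("other", some 9)],
   [("raw_listing_hits", some 4)]]

def Spec_summarize_discovery_runs_py (discovery_runs : List (List (String × Option Int))) (out : List (String × Int)) : Prop := out = summarize_discovery_runs_py_alt discovery_runs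
instance (discovery_runs : List (List (String × Option Int))) (out : List (String × Int)) : Decidable (Spec_summarize_discovery_runs_py discovery_runs out) := by unfold Spec_summarize_discovery_runs_py; infer_instance

-- ===== CLAIM (what is proved, stated in full; the proofs are below) =====
def Claim_equal_summarize_discovery_runs_py : Prop := ∀ (discovery_runs : List (List (String × Option Int))), Dom_summarize_discovery_runs_py discovery_runs → Pre_summarize_discovery_runs_py discovery_runs → Spec_summarize_discovery_runs_py discovery_runs (summarize_discovery_runs_py discovery_runs)

-- ===== LEMMAS AND PROOFS =====

-- sum of the values of all items of `row` carrying key `k`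
def pvRowSum (row : List (String × Option Int)) (k : String) : Int :=
  ((row.filter (fun p => p.1 == k)).map (fun p => p.2.getD 0)).sum

theorem pvKeys_rowStep (t : PySem.Dict String Int) (p : String × Option Int) :
    (pvRowStep t p).keys = t.keys := by
  unfold pvRowStep
  split
  · rename_i h
    rw [PySem.Dict.keys_modify, PySem.Dict.keys_insert_of_contains _ _ h]
  · rfl

theorem pvKeys_rowFold (row : List (String × Option Int)) (t : PySem.Dict String Int) :
    (row.foldl pvRowStep t).keys = t.keys := by
  induction row generalizing t with
  | nil => rfl
  | cons p rest ih => rw [List.foldl_cons, ih, pvKeys_rowStep]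

theorem pvContains_rowFold (row : List (String × Option Int)) (t : PySem.Dict String Int)
    (k : String) : (row.foldl pvRowStep t).contains k = t.contains k := by
  rw [PySem.Dict.contains_eq_decide_mem_keys, PySem.Dict.contains_eq_decide_mem_keys,
    pvKeys_rowFold]

theorem pvGetD_rowFold (row : List (String × Option Int)) (t : PySem.Dict String Int)
    (k : String) (hk : t.contains k = true) :
    (row.foldl pvRowStep t).getD k 0 = t.getD k 0 + pvRowSum row k := by
  induction row generalizing t with
  | nil => simp [pvRowSum]
  | cons p rest ih =>
    rw [List.foldl_cons]
    have hc : (pvRowStep t p).contains k = true := by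
      unfold pvRowStep
      split
      · rw [PySem.Dict.contains_modify]; simp [hk]
      · exact hk
    rw [ih _ hc]
    unfold pvRowStep pvRowSum
    by_cases hpk : p.1 = k
    · subst hpk
      rw [if_pos hk, PySem.Dict.getD_modify, if_pos rfl]
      simp [add_assoc]
    · rcases hcp : t.contains p.1 with _ | _
      · simp [show (p.1 == k) = false by simp [hpk]]
      · simp only [if_true, PySem.Dict.getD_modify, if_neg (Ne.symm hpk)]
        simp [show (p.1 == k) = false by simp [hpk]]

theorem pvGetD_outerFold (l : List (List (String × Option Int))) (t : PySem.Dict String Int)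
    (k : String) (hk : t.contains k = true) :
    ((l.foldl (fun t row => row.foldl pvRowStep t) t).getD k 0)
      = t.getD k 0 + (l.map (fun row => pvRowSum row k)).sum := by
  induction l generalizing t with
  | nil => simp
  | cons row rest ih =>
    rw [List.foldl_cons, ih _ (by rw [pvContains_rowFold]; exact hk),
      pvGetD_rowFold _ _ _ hk]
    simp [add_assoc]

theorem pvRowSum_eq_getNum (row : List (String × Option Int)) (k : String)
    (h : (row.map Prod.fst).Nodup) : pvRowSum row k = pvGetNum row k := by
  induction row with
  | nil => rfl
  | cons p rest ih =>
    simp only [List.map_cons, List.nodup_cons] at h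
    unfold pvRowSum pvGetNum
    rw [List.find?_cons, List.filter_cons]
    by_cases hpk : p.1 = k
    · have hfilt : rest.filter (fun q => q.1 == k) = [] := by
        rw [List.filter_eq_nil_iff]
        intro q hq hqk
        have hm : q.1 ∈ rest.map Prod.fst := List.mem_map_of_mem hq
        rw [show q.1 = k by simpa using hqk, ← hpk] at hm
        exact h.1 hm
      simp only [show (p.1 == k) = true by simp [hpk], if_true, hfilt,
        List.map_cons, List.map_nil, List.sum_cons, List.sum_nil, add_zero]
      rcases p with ⟨s, _ | n⟩ <;> rfl
    · simp only [show (p.1 == k) = false by simp [hpk]]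
      exact ih h.2

theorem pvKeys_outerFold (l : List (List (String × Option Int))) (t : PySem.Dict String Int) :
    (l.foldl (fun t row => row.foldl pvRowStep t) t).keys = t.keys := by
  induction l generalizing t with
  | nil => rfl
  | cons row rest ih => rw [List.foldl_cons, ih, pvKeys_rowFold]

-- A's per-key generator sum equals the map-sum of per-row key sums, given unique keys per row
theorem pvASum (l : List (List (String × Option Int))) (k : String)
    (h : ∀ row ∈ l, (row.map Prod.fst).Nodup) :
    l.foldl (fun acc row => acc + pvGetNum row k) 0
      = (l.map (fun row => pvRowSum row k)).sum := by
  rw [PySem.List.foldl_add, zero_add]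
  congr 1
  exact List.map_congr_left (fun row hr => (pvRowSum_eq_getNum row k (h row hr)).symm)

-- ===== VERDICT (by name: the statement is the Claim_ definition above) =====
theorem summarize_discovery_runs_py_spec : Claim_equal_summarize_discovery_runs_py := by
  intro drs _ hpre
  show _ = _
  simp only [summarize_discovery_runs_py, summarize_discovery_runs_py_alt]
  set init := PySem.Dict.ofList (pvMetrics.map (fun k => (k, (0 : Int)))) with hinit
  set totals := drs.foldl (fun t row => row.foldl pvRowStep t) init with htot
  have hkeys : totals.keys = pvMetrics := by rw [htot, pvKeys_outerFold, hinit]; decide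
  have hval : ∀ k : String, init.contains k = true → init.getD k 0 = 0 →
      totals.getD k 0 = drs.foldl (fun acc row => acc + pvGetNum row k) 0 := by
    intro k hk h0
    rw [htot, pvGetD_outerFold _ _ _ hk, h0, zero_add, pvASum _ _ hpre]
  have hitems : totals.items = pvMetrics.map (fun k => (k, totals.getD k 0)) := by
    conv_lhs => rw [PySem.Dict.items_eq_map_keys totals (hkeys ▸ (by decide : pvMetrics.Nodup)) 0]
    rw [hkeys]
  rw [hitems]
  simp only [pvMetrics, List.map_cons, List.map_nil]
  rw [hval "raw_listing_hits" (by rw [hinit]; decide) (by rw [hinit]; decide),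
      hval "unique_listing_hits" (by rw [hinit]; decide) (by rw [hinit]; decide),
      hval "successful_scans" (by rw [hinit]; decide) (by rw [hinit]; decide),
      hval "failed_scans" (by rw [hinit]; decide) (by rw [hinit]; decide),
      hval "scanned_leaf_catalogs" (by rw [hinit]; decide) (by rw [hinit]; decide)]
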